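-- pv_equiv track=rewrite | github.com/ritesh-ui/RepoInspect | ast_engine.py | merge_propagation_maps
-- ===== SOURCE A (Python) =====
-- from typing import List, Set, Dict, Optional, Union
--
-- def merge_propagation_maps(maps: List[Dict]) -> Dict:
--     """Combines multiple propagation maps into one."""
--     merged = {}
--     for m in maps:
--         for func_name, info in m.items():
--             if func_name not in merged:
--                 merged[func_name] = {'tainted_indices': set()}
--             merged[func_name]['tainted_indices'].update(info['tainted_indices'])
--     return merged
-- ===== SOURCE B (Python) =====
-- from collections import defaultdict
--
--
-- def merge_propagation_maps(maps):
--     """Combines multiple propagation maps into one (gather-then-reduce)."""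
--     groups = defaultdict(list)
--     for m in maps:
--         for func_name, info in m.items():
--             groups[func_name].append(info['tainted_indices'])
--     merged = {}
--     for func_name, sets in groups.items():
--         merged[func_name] = {'tainted_indices': set().union(*sets)}
--     return merged
-- ===== Notes on version B (the rewrite author's own statement) =====
-- stated objective: alternative
-- what changed: A merges incrementally, updating one growing per-function set while walking the maps; B first gathers every entry's tainted_indices set into a per-function group list (one pass), then builds the merged dict by unioning each group in a second pass.
import Mathlib
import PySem

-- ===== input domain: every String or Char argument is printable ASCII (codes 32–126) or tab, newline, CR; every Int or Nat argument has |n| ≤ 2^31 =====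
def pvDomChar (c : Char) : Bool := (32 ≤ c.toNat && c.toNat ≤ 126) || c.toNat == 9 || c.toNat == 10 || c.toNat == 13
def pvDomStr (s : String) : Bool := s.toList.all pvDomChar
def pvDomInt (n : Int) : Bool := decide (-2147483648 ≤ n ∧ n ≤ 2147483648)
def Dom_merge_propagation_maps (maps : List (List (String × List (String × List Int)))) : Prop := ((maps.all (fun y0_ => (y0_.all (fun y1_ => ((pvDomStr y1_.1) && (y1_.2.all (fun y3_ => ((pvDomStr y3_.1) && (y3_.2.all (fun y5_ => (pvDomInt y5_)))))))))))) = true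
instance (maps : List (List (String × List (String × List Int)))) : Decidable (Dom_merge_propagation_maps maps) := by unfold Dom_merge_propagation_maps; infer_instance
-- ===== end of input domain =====

-- B replaces A's incremental update-one-set accumulation by a gather-then-reduce
-- decomposition (group all tainted-index sets per function, then union each group);
-- same cost, different shape (objective: alternative).

-- ===== PORT A =====
-- info['tainted_indices'] on an assoc-list dict: first match; the KeyError case
-- (no matching key) is excluded by Pre_merge_propagation_maps.
def pvTI (info : List (String × List Int)) : List Int :=
  ((info.find? (fun p => p.1 == "tainted_indices")).map (·.2)).getD []

-- body of A's inner loop: the 'if func_name not in merged' guard, then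
-- merged[func_name]['tainted_indices'].update(info['tainted_indices']).
-- The inner dict always carries the key "tainted_indices", so the in-place set
-- update is the exact assoc-list value replacement at that key.
def pvStepA (merged : PySem.Dict String (List (String × List Int)))
    (e : String × List (String × List Int)) : PySem.Dict String (List (String × List Int)) :=
  let merged' := if merged.contains e.1 then merged
                 else merged.insert e.1 [("tainted_indices", ([] : List Int))]
  merged'.modify e.1 []
    (fun info => info.map (fun p =>
      if p.1 == "tainted_indices" then (p.1, PySem.Set.update p.2 (pvTI e.2)) else p))

def merge_propagation_maps (maps : List (List (String × List (String × List Int)))) : List (String × List (String × List Int)) :=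
  (maps.foldl (fun merged m => m.foldl pvStepA merged) PySem.Dict.empty).items

-- ===== PORT B =====
-- first pass: defaultdict(list) — groups[func_name].append(info['tainted_indices'])
def pvStepB (groups : PySem.Dict String (List (List Int)))
    (e : String × List (String × List Int)) : PySem.Dict String (List (List Int)) :=
  groups.modify e.1 [] (fun sets => sets ++ [pvTI e.2])

-- second pass: merged[func_name] = {'tainted_indices': set().union(*sets)}
def merge_propagation_maps_alt (maps : List (List (String × List (String × List Int)))) : List (String × List (String × List Int)) :=
  let groups := maps.foldl (fun g m => m.foldl pvStepB g) PySem.Dict.empty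
  groups.items.map (fun p =>
    (p.1, [("tainted_indices", p.2.foldl PySem.Set.union PySem.Set.empty)]))

-- ===== PRECONDITION & SPEC =====
-- Pre_ excludes exactly the inputs where some entry's info dict lacks the key
-- 'tainted_indices': there Python A (and B alike) raises KeyError.
def Pre_merge_propagation_maps (maps : List (List (String × List (String × List Int)))) : Prop :=
  ∀ m ∈ maps, ∀ e ∈ m, e.2.any (fun p => p.1 == "tainted_indices") = true
instance (maps : List (List (String × List (String × List Int)))) : Decidable (Pre_merge_propagation_maps maps) := by unfold Pre_merge_propagation_maps; infer_instance

def pvWitness_merge_propagation_maps : (List (List (String × List (String × List Int)))) :=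
  [[("f", [("tainted_indices", [1, 2])])],
   [("f", [("tainted_indices", [2, 3])]), ("g", [("tainted_indices", [])])]]

def Spec_merge_propagation_maps (maps : List (List (String × List (String × List Int)))) (out : List (String × List (String × List Int))) : Prop := out = merge_propagation_maps_alt maps
instance (maps : List (List (String × List (String × List Int)))) (out : List (String × List (String × List Int))) : Decidable (Spec_merge_propagation_maps maps out) := by unfold Spec_merge_propagation_maps; infer_instance

-- ===== CLAIM (what is proved, stated in full; the proofs are below) =====
def Claim_equal_merge_propagation_maps : Prop := ∀ (maps : List (List (String × List (String × List Int)))), Dom_merge_propagation_maps maps → Pre_merge_propagation_maps maps → Spec_merge_propagation_maps maps (merge_propagation_maps maps)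

-- ===== LEMMAS AND PROOFS =====

-- B's grouping state rendered as A's merged state: per function, the union
-- (in list order) of the gathered sets, wrapped in the one-key inner dict.
def pvF (p : String × List (List Int)) : String × List (String × List Int) :=
  (p.1, [("tainted_indices", p.2.foldl PySem.Set.union PySem.Set.empty)])

def pvRender (g : PySem.Dict String (List (List Int))) : PySem.Dict String (List (String × List Int)) :=
  PySem.Dict.mk (g.items.map pvF)

theorem pvStep_comm (g : PySem.Dict String (List (List Int)))
    (e : String × List (String × List Int)) :
    pvStepA (pvRender g) e = pvRender (pvStepB g e) := by
  obtain ⟨l⟩ := g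
  have hany : (l.map pvF).any (fun p => p.1 == e.1) = l.any (fun p => p.1 == e.1) := by
    rw [List.any_map]; rfl
  have hfind : (l.map pvF).find? (fun p => p.1 == e.1) = (l.find? (fun p => p.1 == e.1)).map pvF := by
    rw [List.find?_map]; rfl
  by_cases hc : l.any (fun p => p.1 == e.1) = true
  · have hsome : (l.find? (fun p => p.1 == e.1)).isSome := by
      rcases List.any_eq_true.mp hc with ⟨x, hx, hpx⟩
      exact List.find?_isSome.mpr ⟨x, hx, hpx⟩
    obtain ⟨p0, hp0⟩ := Option.isSome_iff_exists.mp hsome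
    simp only [pvStepA, pvStepB, pvRender, PySem.Dict.modify, PySem.Dict.insert,
      PySem.Dict.contains, PySem.Dict.getD, PySem.Dict.get?,
      hfind, hany, hc, if_true, hp0, Option.map_some, Option.getD_some, List.map_map]
    congr 1
    apply List.map_congr_left
    intro p _
    simp only [Function.comp]
    by_cases hp : p.1 = e.1
    · simp [pvF, hp, List.foldl_append, PySem.Set.union]
    · simp [pvF, hp]

  · have hnone : l.find? (fun p => p.1 == e.1) = none :=
      by
      rw [List.find?_eq_none]
      intro x hx
      simp only [beq_iff_eq]
      intro h
      exact hc (List.any_eq_true.mpr ⟨x, hx, by simp [h]⟩)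
    simp only [pvStepA, pvStepB, pvRender, PySem.Dict.modify, PySem.Dict.insert,
      PySem.Dict.contains, PySem.Dict.getD, PySem.Dict.get?,
      hany, hc, hnone, List.map_map]
    have hmem : ∀ q ∈ l, ¬ q.1 = e.1 := by
      intro q hq h
      exact hc (List.any_eq_true.mpr ⟨q, hq, by simp [h]⟩)
    simp only [Bool.false_eq_true, if_false, List.any_append, hany, List.any_cons,
      List.any_nil, beq_self_eq_true, Bool.or_true, Bool.true_or, if_true,
      List.find?_append, hfind, hnone, Option.map_none, Option.none_or,
      List.find?_cons, Option.map_some, Option.getD_some,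
      List.map_append, List.map_map, List.map_cons, List.map_nil]
    congr 1
    have h1 : ∀ (a c : List (String × List (String × List Int))) (x y : String × List (String × List Int)), a = c → x = y → a ++ [x] = c ++ [y] := by
      intro a c x y h h'; rw [h, h']
    apply h1
    · apply List.map_congr_left
      intro p hp
      simp [pvF, hmem p hp]
    · simp [pvF, PySem.Set.union]

theorem pvFold_comm (m : List (String × List (String × List Int)))
    (g : PySem.Dict String (List (List Int))) :
    m.foldl pvStepA (pvRender g) = pvRender (m.foldl pvStepB g) := by
  induction m generalizing g with
  | nil => rfl
  | cons e m ih => simpa [pvStep_comm g e] using ih (pvStepB g e)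

-- ===== VERDICT (by name: the statement is the Claim_ definition above) =====
theorem merge_propagation_maps_spec : Claim_equal_merge_propagation_maps := by
  intro maps _ _
  unfold Spec_merge_propagation_maps merge_propagation_maps merge_propagation_maps_alt
  have h : maps.foldl (fun merged m => m.foldl pvStepA merged) PySem.Dict.empty
      = pvRender (maps.foldl (fun g m => m.foldl pvStepB g) PySem.Dict.empty) := by
    have : ∀ (ms : List (List (String × List (String × List Int))))
        (g : PySem.Dict String (List (List Int))),
        ms.foldl (fun merged m => m.foldl pvStepA merged) (pvRender g)
          = pvRender (ms.foldl (fun g m => m.foldl pvStepB g) g) := by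
      intro ms
      induction ms with
      | nil => intro g; rfl
      | cons m ms ih => intro g; simpa [pvFold_comm m g] using ih (m.foldl pvStepB g)
    simpa using this maps (PySem.Dict.mk [])
  rw [h]
  rfl
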